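-- pv_equiv track=rewrite | github.com/bhattagoutham/competetive-programming | rep-char.py | isalt
-- ===== SOURCE A (Python) =====
-- def isalt(s):
--     i = 2; n = len(s); isalt = True
--     patt = s[0:2]
--
--     if n == 1:
--         return False
--
--     odd = True if not n % 2 == 0 else False
--     n = n-1 if odd else n
--
--     while i < n:
--         if not s[i:i+2] == patt:
--             isalt = False; break
--         i += 2
--     isalt = False if isalt and odd and s[-1] != s[0] else isalt
--     return isalt
-- ===== SOURCE B (Python) =====
-- def isalt(s):
--     n = len(s)
--     if n == 1:
--         return False
--     expected = s[0:2] * (n // 2) + (s[0] if n % 2 else '')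
--     return s == expected
-- ===== Notes on version B (the rewrite author's own statement) =====
-- stated objective: simpler
-- what changed: Instead of stepping an index by two and comparing each 2-char slice against the pattern (with a separate last-char check for odd length), B constructs the full expected string patt*(n//2) plus an odd tail s[0] and does a single equality comparison.
import Mathlib
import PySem

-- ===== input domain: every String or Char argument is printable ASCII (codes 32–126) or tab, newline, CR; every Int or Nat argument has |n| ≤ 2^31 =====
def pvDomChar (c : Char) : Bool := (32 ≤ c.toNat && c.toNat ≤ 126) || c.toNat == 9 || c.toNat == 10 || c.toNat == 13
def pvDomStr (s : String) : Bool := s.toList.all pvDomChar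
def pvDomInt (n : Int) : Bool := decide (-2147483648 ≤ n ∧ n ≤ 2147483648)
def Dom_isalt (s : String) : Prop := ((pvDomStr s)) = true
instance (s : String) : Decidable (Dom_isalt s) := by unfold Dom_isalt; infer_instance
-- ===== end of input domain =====

-- B builds the whole expected alternating string and compares once, instead of A's
-- index-stepping slice-by-slice scan with a separate odd-tail check (objective: simpler).


-- ===== PORT A =====
-- the 'while i < n' loop; s[i:i+2] ported as (s.drop i).take 2, exact by PySem.List.slice_natCast_add
def isaltLoop (s patt : List Char) (i n : Nat) : Bool :=
  if i < n then
    if ¬ ((s.drop i).take 2 = patt) then false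
    else isaltLoop s patt (i + 2) n
  else true
termination_by n - i

def isalt (s : String) : Bool :=
  let l := s.toList
  let n := l.length
  let patt := l.take 2        -- s[0:2], exact by PySem.List.slice_to_natCast
  if n = 1 then false
  else
    let odd : Bool := if ¬ (n % 2 = 0) then true else false
    let n1 := if odd then n - 1 else n
    let r := isaltLoop l patt 2 n1
    -- 'False if isalt and odd and s[-1] != s[0] else isalt'; s[-1]/s[0] via PySem.List.pyGetD,
    -- only inspected when odd (hence l nonempty), exactly as Python's short-circuit 'and'
    if r && odd && !(PySem.List.pyGetD l (-1) ' ' == PySem.List.pyGetD l 0 ' ') then false else r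

-- ===== PORT B =====
def isalt_alt (s : String) : Bool :=
  let l := s.toList
  let n := l.length
  if n = 1 then false
  else
    let patt := l.take 2      -- s[0:2], exact by PySem.List.slice_to_natCast
    -- patt * (n // 2) + (s[0] if n % 2 else ''); s[0] only taken when n is odd (l nonempty)
    let expected := (List.replicate (n / 2) patt).flatten ++
      (if n % 2 ≠ 0 then [l.getD 0 ' '] else [])
    decide (l = expected)

-- ===== PRECONDITION & SPEC =====
def Spec_isalt (s : String) (out : Bool) : Prop := out = isalt_alt s
instance (s : String) (out : Bool) : Decidable (Spec_isalt s out) := by unfold Spec_isalt; infer_instance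

-- ===== CLAIM (what is proved, stated in full; the proofs are below) =====
def Claim_equal_isalt : Prop := ∀ (s : String), Dom_isalt s → Spec_isalt s (isalt s)

-- ===== LEMMAS AND PROOFS =====

-- common reference predicate: the tail r alternately continues the two-char pattern a, b
def altB (a b : Char) : List Char → Bool
  | [] => true
  | [x] => x == a
  | x :: y :: t => x == a && y == b && altB a b t

-- the even number of tail characters A's while loop scans (the tail is the string minus its first two chars)
def evenLen (r : List Char) : Nat := if r.length % 2 = 1 then r.length - 1 else r.length

theorem loopShift (x y : Char) (r patt : List Char) (i n : Nat) :
    isaltLoop (x :: y :: r) patt (i + 2) (n + 2) = isaltLoop r patt i n := by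
  fun_induction isaltLoop r patt i n with
  | case1 i hlt hne =>
    rw [isaltLoop]
    simp [show i + 2 = i + 1 + 1 from rfl, List.drop_succ_cons, hne]
    omega
  | case2 i hlt hne ih =>
    rw [isaltLoop]
    simp only [show i + 2 = i + 1 + 1 from rfl, List.drop_succ_cons]
    simp only [not_not] at hne
    simp [hlt, hne]
    simpa [show i + 1 + 1 + 2 = i + 2 + 2 from rfl] using ih
  | case3 i hge =>
    rw [isaltLoop]
    simp at hge ⊢; omega

theorem loop_altB (a b : Char) (r : List Char) :
    (isaltLoop r [a, b] 0 (evenLen r) &&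
      (if r.length % 2 = 1 then decide (r.getLast? = some a) else true)) = altB a b r := by
  fun_induction altB a b r with
  | case1 => rw [isaltLoop]; simp [evenLen]
  | case2 x => rw [isaltLoop]; simp [evenLen, Bool.beq_eq_decide_eq]
  | case3 x y t ih =>
    have he : evenLen (x :: y :: t) = evenLen t + 2 := by
      simp [evenLen]; split_ifs <;> simp <;> omega
    have h3 : (x :: y :: t).length % 2 = t.length % 2 := by simp; omega
    rw [he, h3, isaltLoop]
    simp only [show (0:Nat) + 2 = 2 from rfl, Nat.zero_lt_succ, if_pos, List.drop_zero]
    rw [show isaltLoop (x :: y :: t) [a,b] 2 (evenLen t + 2) =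
          isaltLoop t [a,b] 0 (evenLen t) from loopShift x y t [a,b] 0 (evenLen t)]
    by_cases hodd : t.length % 2 = 1
    · have ht : t ≠ [] := by intro h; subst h; simp at hodd
      rw [if_pos hodd] at ih ⊢
      have hlast : (x :: y :: t).getLast? = t.getLast? := by
        rcases t with _ | ⟨z, t'⟩
        · simp at ht
        · simp [List.getLast?_cons_cons]
      rw [hlast, ← ih]
      by_cases hx : x = a <;> by_cases hy : y = b <;> simp [hx, hy, Bool.beq_eq_decide_eq]
    · rw [if_neg hodd] at ih ⊢
      rw [← ih]
      by_cases hx : x = a <;> by_cases hy : y = b <;> simp [hx, hy, Bool.beq_eq_decide_eq]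

theorem expected_altB (a b : Char) (r : List Char) :
    decide (r = (List.replicate (r.length / 2) [a, b]).flatten ++
      (if r.length % 2 ≠ 0 then [a] else [])) = altB a b r := by
  fun_induction altB a b r with
  | case1 => simp
  | case2 x => simp [Bool.beq_eq_decide_eq]
  | case3 x y t ih =>
    have h2 : (x :: y :: t).length / 2 = t.length / 2 + 1 := by simp; omega
    have h3 : (x :: y :: t).length % 2 = t.length % 2 := by simp; omega
    rw [← ih, h2, h3, List.replicate_succ, List.flatten_cons]
    simp [List.cons_append, Bool.and_assoc, Bool.beq_eq_decide_eq]

-- ===== VERDICT (by name: the statement is the Claim_ definition above) =====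
theorem isalt_spec : Claim_equal_isalt := by
  intro s _
  show isalt s = isalt_alt s
  simp only [isalt, isalt_alt]
  generalize s.toList = l
  rcases l with _ | ⟨a, t⟩
  · simp [isaltLoop]
  rcases t with _ | ⟨b, r⟩
  · simp
  -- l = a :: b :: r
  have hn1 : ¬ ((a :: b :: r).length = 1) := by simp
  rw [if_neg hn1, if_neg hn1]
  have hpatt : (a :: b :: r).take 2 = [a, b] := rfl
  have hmod : (a :: b :: r).length % 2 = r.length % 2 := by simp; omega
  have hdiv : (a :: b :: r).length / 2 = r.length / 2 + 1 := by simp; omega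
  have hgetD0 : (a :: b :: r).getD 0 ' ' = a := rfl
  rw [hpatt, hgetD0, hdiv, hmod, List.replicate_succ, List.flatten_cons]
  rw [show decide (a :: b :: r = ([a, b] ++ (List.replicate (r.length / 2) [a, b]).flatten) ++
        (if r.length % 2 ≠ 0 then [a] else []))
      = decide (r = (List.replicate (r.length / 2) [a, b]).flatten ++
        (if r.length % 2 ≠ 0 then [a] else [])) from by simp]
  rw [expected_altB a b r, ← loop_altB a b r]
  by_cases hodd : r.length % 2 = 1
  · have hr : r ≠ [] := by intro h; subst h; simp at hodd
    rw [if_pos hodd]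
    have hcond : (if ¬ r.length % 2 = 0 then true else false) = true := by simp [hodd]
    rw [hcond]
    simp only [if_true]
    have hlen : (a :: b :: r).length - 1 = evenLen r + 2 := by
      simp [evenLen, hodd]; omega
    have hls : isaltLoop (a :: b :: r) [a, b] 2 (evenLen r + 2) =
        isaltLoop r [a, b] 0 (evenLen r) := loopShift a b r [a, b] 0 (evenLen r)
    rw [hlen, hls]
    rw [PySem.List.pyGetD_neg_one (a :: b :: r) ' ' (by simp), PySem.List.pyGetD_zero_cons]
    have hlast : (a :: b :: r).getLast (by simp) = r.getLast hr := by
      rw [List.getLast_cons (by simp : (b :: r) ≠ [])]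
      exact List.getLast_cons hr
    rw [hlast, List.getLast?_eq_some_getLast hr]
    cases hL : isaltLoop r [a, b] 0 (evenLen r) <;>
      cases hg : (r.getLast hr == a) <;>
        simp_all [Bool.beq_eq_decide_eq]
  · rw [if_neg hodd]
    have heven : r.length % 2 = 0 := by omega
    have hcond : (if ¬ r.length % 2 = 0 then true else false) = false := by simp [heven]
    rw [hcond]
    have hlen : (a :: b :: r).length = evenLen r + 2 := by
      simp [evenLen, heven]
    have hls : isaltLoop (a :: b :: r) [a, b] 2 (evenLen r + 2) =
        isaltLoop r [a, b] 0 (evenLen r) := loopShift a b r [a, b] 0 (evenLen r)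
    simp [hlen, hls]
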